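-- pv_equiv track=rewrite | github.com/ayzekinus/arkeologyweb | backend/core/models.py | int_to_code
-- ===== SOURCE A (Python) =====
-- ALPHABET = "ABCDEFGHIJKLMNOPQRSTUVWXYZ"
--
-- BASE = 26
--
-- MAX_CODE_INT = BASE**3 - 1  # ZZZ
--
-- def int_to_code(n: int) -> str:
--     if n < 0 or n > MAX_CODE_INT:
--         raise ValueError("Out of range for 3-letter code.")
--     chars = []
--     for _ in range(3):
--         n, rem = divmod(n, BASE)
--         chars.append(ALPHABET[rem])
--     return "".join(reversed(chars))
-- ===== SOURCE B (Python) =====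
-- ALPHABET = "ABCDEFGHIJKLMNOPQRSTUVWXYZ"
--
-- BASE = 26
--
-- MAX_CODE_INT = BASE**3 - 1  # ZZZ
--
-- def int_to_code(n: int) -> str:
--     if n < 0 or n > MAX_CODE_INT:
--         raise ValueError("Out of range for 3-letter code.")
--     return ALPHABET[n // (BASE * BASE)] + ALPHABET[(n // BASE) % BASE] + ALPHABET[n % BASE]
-- ===== Notes on version B (the rewrite author's own statement) =====
-- stated objective: simpler
-- what changed: Replaced the loop with accumulator list, divmod state threading and reversed-join by a loop-free direct computation of the three base-26 digits (quotient by BASE squared, middle digit, remainder) concatenated in output order.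
import Mathlib
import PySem

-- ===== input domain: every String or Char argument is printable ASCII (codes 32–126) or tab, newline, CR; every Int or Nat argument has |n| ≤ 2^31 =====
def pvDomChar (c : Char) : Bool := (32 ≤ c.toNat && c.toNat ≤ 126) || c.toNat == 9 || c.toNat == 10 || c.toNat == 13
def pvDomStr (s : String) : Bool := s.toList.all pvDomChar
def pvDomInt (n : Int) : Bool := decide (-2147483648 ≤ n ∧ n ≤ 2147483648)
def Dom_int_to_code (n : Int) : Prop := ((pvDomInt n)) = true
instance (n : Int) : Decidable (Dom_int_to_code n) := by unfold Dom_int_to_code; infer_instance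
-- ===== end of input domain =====

-- B replaces A's divmod loop / accumulator / reversal by a loop-free direct digit computation (simpler).

-- ===== PORT A =====
-- ALPHABET[rem] as a character; rem = mod _ 26 is always in range, so getD never takes its default
def pvCharA (i : Int) : Char :=
  (PySem.Str.pyGet? "ABCDEFGHIJKLMNOPQRSTUVWXYZ" i).getD 'A'

def int_to_code (n : Int) : String :=
  if n < 0 || n > 17575 then ""   -- Python raises ValueError here; excluded by Pre_
  else
    let res := (PySem.List.pyRange 0 3 1).foldl
      (fun (st : Int × List Char) (_ : Int) =>
        (PySem.Int.floordiv st.1 26, st.2 ++ [pvCharA (PySem.Int.mod st.1 26)]))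
      (n, [])
    String.ofList res.2.reverse

-- ===== PORT B =====
def int_to_code_alt (n : Int) : String :=
  if n < 0 || n > 17575 then ""   -- same guard as A (ValueError); excluded by Pre_
  else
    String.ofList [pvCharA (PySem.Int.floordiv n (26 * 26)),
                   pvCharA (PySem.Int.mod (PySem.Int.floordiv n 26) 26),
                   pvCharA (PySem.Int.mod n 26)]

-- ===== PRECONDITION & SPEC =====
-- Pre_ excludes exactly the inputs on which A raises ValueError ("Out of range for 3-letter code.")
def Pre_int_to_code (n : Int) : Prop := 0 ≤ n ∧ n ≤ 17575
instance (n : Int) : Decidable (Pre_int_to_code n) := by unfold Pre_int_to_code; infer_instance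
def pvWitness_int_to_code : Int := (702)

def Spec_int_to_code (n : Int) (out : String) : Prop := out = int_to_code_alt n
instance (n : Int) (out : String) : Decidable (Spec_int_to_code n out) := by unfold Spec_int_to_code; infer_instance

-- ===== CLAIM (what is proved, stated in full; the proofs are below) =====
def Claim_equal_int_to_code : Prop := ∀ (n : Int), Dom_int_to_code n → Pre_int_to_code n → Spec_int_to_code n (int_to_code n)

-- ===== LEMMAS AND PROOFS =====
theorem third_digit_eq (n : Int) (h0 : 0 ≤ n) (h1 : n ≤ 17575) :
    PySem.Int.mod (PySem.Int.floordiv (PySem.Int.floordiv n 26) 26) 26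
      = PySem.Int.floordiv n (26 * 26) := by
  have hm : ∀ a : Int, PySem.Int.mod a 26 = a % 26 :=
    fun _ => PySem.Int.mod_eq_emod_of_pos (by omega)
  have hd : ∀ a : Int, PySem.Int.floordiv a 26 = a / 26 :=
    fun _ => PySem.Int.floordiv_eq_ediv_of_pos (by omega)
  have hd' : PySem.Int.floordiv n (26 * 26) = n / (26 * 26) :=
    PySem.Int.floordiv_eq_ediv_of_pos (by omega)
  rw [hm, hd, hd, hd']
  omega

-- ===== VERDICT (by name: the statement is the Claim_ definition above) =====
theorem int_to_code_spec : Claim_equal_int_to_code := by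
  intro n _ hpre
  obtain ⟨h0, h1⟩ := hpre
  unfold Spec_int_to_code int_to_code int_to_code_alt
  have hguard : (n < 0 || n > 17575) = false := by simp; omega
  rw [hguard]
  simp only [Bool.false_eq_true, if_false]
  have hrange : PySem.List.pyRange 0 3 1 = [0, 1, 2] := by decide
  rw [hrange]
  simp only [List.foldl, List.reverse_cons, List.reverse_nil, List.nil_append, List.cons_append]

  rw [third_digit_eq n h0 h1]
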